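-- pv_equiv track=rewrite | github.com/iwomavn/fondinfo_2526 | esercitazioni_lab/6_esercitazione/1_maiuscole_tra_asterischi.py | shout
-- ===== SOURCE A (Python) =====
-- def shout(s):
--     inside = False
--     result = ""  # nuova stringa modificata
--     for c in s:
--         if c == "*":
--             inside = not inside
--         else:
--             if inside:
--                 c = c.upper()
--             result += c  # aggiungiamo il carattere alla nuova stringa
--     return result
-- ===== SOURCE B (Python) =====
-- def shout(s):
--     # Split on '*': segments alternate outside (even) / inside (odd) asterisks.
--     def render(parts, inside):
--         if not parts:
--             return ""
--         head = parts[0].upper() if inside else parts[0]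
--         return head + render(parts[1:], not inside)
--     return render(s.split('*'), False)
-- ===== Notes on version B (the rewrite author's own statement) =====
-- stated objective: simpler
-- what changed: Replaces the per-character inside-flag toggling loop by s.split('*') followed by a recursive pass that uppercases every odd-indexed (inside) segment and concatenates.
import Mathlib
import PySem

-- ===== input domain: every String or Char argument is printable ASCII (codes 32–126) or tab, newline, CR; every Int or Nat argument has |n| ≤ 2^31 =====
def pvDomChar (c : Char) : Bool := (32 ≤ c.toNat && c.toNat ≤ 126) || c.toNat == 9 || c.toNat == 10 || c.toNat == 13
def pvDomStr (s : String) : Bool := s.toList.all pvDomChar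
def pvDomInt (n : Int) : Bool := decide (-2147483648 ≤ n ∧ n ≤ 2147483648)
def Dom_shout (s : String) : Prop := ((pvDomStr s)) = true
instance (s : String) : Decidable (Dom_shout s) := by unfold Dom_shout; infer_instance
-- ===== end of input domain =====

-- B replaces A's per-character inside-flag loop by split('*') + a recursive pass
-- uppercasing the odd-indexed (inside) segments; objective: simpler.

-- ===== PORT A =====
-- per-character loop with an 'inside' flag and a growing result string
def shout (s : String) : String :=
  String.ofList
    ((s.toList.foldl
        (fun st c =>
          if c == '*' then (!st.1, st.2)
          else (st.1, st.2 ++ [if st.1 then PySem.Chars.upperChar c else c]))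
        (false, ([] : List Char))).2)

-- ===== PORT B =====
-- render(parts, inside): head segment uppercased when inside, recurse with flag flipped
def shoutRender : List (List Char) → Bool → List Char
  | [], _ => []
  | p :: rest, inside =>
      (if inside then PySem.Chars.upper p else p) ++ shoutRender rest (!inside)

def shout_alt (s : String) : String :=
  String.ofList (shoutRender (PySem.Chars.splitOn s.toList ['*']) false)

-- ===== PRECONDITION & SPEC =====
def Spec_shout (s : String) (out : String) : Prop := out = shout_alt s
instance (s : String) (out : String) : Decidable (Spec_shout s out) := by unfold Spec_shout; infer_instance

-- ===== CLAIM (what is proved, stated in full; the proofs are below) =====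
def Claim_equal_shout : Prop := ∀ (s : String), Dom_shout s → Spec_shout s (shout s)

-- ===== LEMMAS AND PROOFS =====

-- reference result of the whole computation, starting with flag b
def shoutSpecFn : Bool → List Char → List Char
  | _, [] => []
  | b, c :: t =>
      if c = '*' then shoutSpecFn (!b) t
      else (if b then PySem.Chars.upperChar c else c) :: shoutSpecFn b t

-- split on '*' as (first segment, remaining segments)
def mySplit : List Char → List Char × List (List Char)
  | [] => ([], [])
  | c :: t =>
      let m := mySplit t
      if c = '*' then ([], m.1 :: m.2) else (c :: m.1, m.2)

theorem shout_foldl_eq (l : List Char) (b : Bool) (acc : List Char) :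
    (l.foldl
        (fun st c =>
          if c == '*' then (!st.1, st.2)
          else (st.1, st.2 ++ [if st.1 then PySem.Chars.upperChar c else c]))
        (b, acc)).2 = acc ++ shoutSpecFn b l := by
  induction l generalizing b acc with
  | nil => simp [shoutSpecFn]
  | cons c t ih =>
    simp only [List.foldl_cons]
    by_cases h : c = '*'
    · subst h
      rw [if_pos (by decide), ih]
      simp [shoutSpecFn]
    · rw [if_neg (by simp [h]), ih]
      simp [shoutSpecFn, h]

theorem splitOn_go_eq (l : List Char) (fuel : Nat) (cur : List Char)
    (acc : List (List Char)) (h : l.length < fuel) :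
    PySem.Chars.splitOn.go ['*'] fuel l cur acc =
      acc.reverse ++ (cur.reverse ++ (mySplit l).1) :: (mySplit l).2 := by
  induction l generalizing fuel cur acc with
  | nil =>
    cases fuel with
    | zero => omega
    | succ f => simp [PySem.Chars.splitOn.go, mySplit]
  | cons c t ih =>
    cases fuel with
    | zero => omega
    | succ f =>
      have ht : t.length < f := by simpa using h
      by_cases hc : c = '*'
      · subst hc
        rw [PySem.Chars.splitOn.go]
        rw [if_pos (by simp [List.isPrefixOf])]
        rw [show List.drop ['*'].length ('*' :: t) = t from rfl]
        rw [ih _ _ _ ht]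
        simp [mySplit]
      · rw [PySem.Chars.splitOn.go]
        rw [if_neg (by simp [List.isPrefixOf]; intro h'; exact hc h'.symm)]
        rw [ih _ _ _ ht]
        simp [mySplit, hc]

theorem splitOn_star (l : List Char) :
    PySem.Chars.splitOn l ['*'] = (mySplit l).1 :: (mySplit l).2 := by
  have := splitOn_go_eq l (l.length + 1) [] [] (by omega)
  simpa [PySem.Chars.splitOn] using this

theorem render_mySplit (l : List Char) (b : Bool) :
    shoutRender ((mySplit l).1 :: (mySplit l).2) b = shoutSpecFn b l := by
  induction l generalizing b with
  | nil => simp [mySplit, shoutRender, shoutSpecFn, PySem.Chars.upper]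
  | cons c t ih =>
    by_cases hc : c = '*'
    · subst hc
      simp only [mySplit, if_pos]
      rw [shoutRender]
      simp [ih (!b), shoutSpecFn, PySem.Chars.upper]
    · simp only [mySplit, if_neg hc]
      rw [shoutRender]
      rw [shoutSpecFn, if_neg hc]
      rw [← ih b]
      rw [shoutRender]
      cases b <;> simp [PySem.Chars.upper]

-- ===== VERDICT (by name: the statement is the Claim_ definition above) =====
theorem shout_spec : Claim_equal_shout := by
  intro s _
  unfold Spec_shout shout shout_alt
  rw [shout_foldl_eq, splitOn_star, render_mySplit]
  simp
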